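-- pv_equiv track=rewrite | github.com/neoluxis/gua4destiny-py | gua4destiny/algo/text_api.py | _find_first_matching_line
-- ===== SOURCE A (Python) =====
-- def _find_first_matching_line(lines: list[str], title_hints: list[str]) -> int:
--     for target in title_hints:
--         idx = _find_line_index(lines, target)
--         if idx >= 0:
--             return idx
--
--     for target in title_hints:
--         if not target:
--             continue
--         for idx, line in enumerate(lines):
--             if target in line.strip():
--                 return idx
--     return -1
--
-- def _find_line_index(lines: list[str], target: str) -> int:
--     for idx, line in enumerate(lines):
--         if line.strip() == target:
--             return idx
--     return -1
-- ===== SOURCE B (Python) =====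
-- def _find_first_matching_line(lines: list[str], title_hints: list[str]) -> int:
--     # Single pass over lines (transposed traversal): each line gets a priority key
--     # (phase, hint_index, line_index) -- phase 0 for an exact match of the stripped
--     # line against a hint, phase 1 for a non-empty hint occurring as a substring --
--     # and the answer is the line of the lexicographically smallest key.
--     best = None
--     for i, line in enumerate(lines):
--         s = line.strip()
--         key = None
--         for j, t in enumerate(title_hints):
--             if best is not None and best[:2] <= (0, j):
--                 break  # no key found at hint index >= j can beat best anymore
--             if s == t:
--                 key = (0, j, i)
--                 break
--             if key is None and t and t in s:
--                 key = (1, j, i)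
--         if key is not None and (best is None or key < best):
--             best = key
--     return best[2] if best is not None else -1
-- ===== Notes on version B (the rewrite author's own statement) =====
-- stated objective: alternative
-- what changed: B transposes the traversal: instead of A's two staged hint-major passes (all hints for an exact match, then all hints for a substring match), B makes a single line-major pass, assigning each line one priority key (phase, hint_index, line_index) and keeping the lexicographically smallest key seen, pruning each inner hint scan at the index where no key could still beat the current best.
import Mathlib
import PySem

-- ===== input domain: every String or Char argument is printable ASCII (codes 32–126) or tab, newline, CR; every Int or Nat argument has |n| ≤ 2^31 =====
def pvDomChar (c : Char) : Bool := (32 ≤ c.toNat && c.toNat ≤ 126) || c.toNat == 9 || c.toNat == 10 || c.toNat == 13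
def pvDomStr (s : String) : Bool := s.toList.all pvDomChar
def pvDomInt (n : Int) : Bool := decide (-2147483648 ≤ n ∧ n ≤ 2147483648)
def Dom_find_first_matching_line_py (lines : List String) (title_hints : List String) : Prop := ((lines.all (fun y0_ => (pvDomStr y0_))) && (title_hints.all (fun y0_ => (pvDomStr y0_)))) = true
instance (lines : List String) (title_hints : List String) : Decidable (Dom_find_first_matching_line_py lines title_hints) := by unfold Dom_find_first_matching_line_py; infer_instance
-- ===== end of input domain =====

-- B transposes the traversal: one line-major pass keeping the lexicographically
-- smallest (phase, hint_index, line_index) key, instead of A's two hint-major passes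
-- (objective: alternative).

-- ===== PORT A =====

-- _find_line_index: scan lines, return first index whose stripped line equals target, else -1
def fflA_lineIndex (target : String) : List String → Int → Int
  | [], _ => -1
  | l :: rest, i =>
    if PySem.Str.strip l = target then i else fflA_lineIndex target rest (i + 1)

-- first loop of A: for target in title_hints: idx = _find_line_index(...); if idx >= 0: return idx
def fflA_phase1 (lines : List String) : List String → Option Int
  | [] => none
  | t :: rest =>
    let idx := fflA_lineIndex t lines 0
    if idx ≥ 0 then some idx else fflA_phase1 lines rest

-- inner loop of A's second phase: first index with target a substring of line.strip()
def fflA_subScan (target : String) : List String → Int → Option Int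
  | [], _ => none
  | l :: rest, i =>
    if PySem.Str.isIn target (PySem.Str.strip l) then some i
    else fflA_subScan target rest (i + 1)

-- second loop of A
def fflA_phase2 (lines : List String) : List String → Int
  | [] => -1
  | t :: rest =>
    if t = "" then fflA_phase2 lines rest
    else match fflA_subScan t lines 0 with
      | some i => i
      | none => fflA_phase2 lines rest

def find_first_matching_line_py (lines : List String) (title_hints : List String) : Int :=
  match fflA_phase1 lines title_hints with
  | some idx => idx
  | none => fflA_phase2 lines title_hints

-- ===== PORT B =====

-- Python tuple '<' on (phase, hint_idx, line_idx)
def fflKeyLt (a b : Int × Int × Int) : Bool :=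
  decide (a.1 < b.1 ∨ (a.1 = b.1 ∧ (a.2.1 < b.2.1 ∨ (a.2.1 = b.2.1 ∧ a.2.2 < b.2.2))))

-- Python 'best is not None and best[:2] <= (0, j)': the prune condition of B's inner loop
def fflPrune (best : Option (Int × Int × Int)) (j : Int) : Bool :=
  match best with
  | some b => decide (b.1 < 0 ∨ (b.1 = 0 ∧ b.2.1 ≤ j))
  | none => false

-- inner loop over hints: break once no key at hint index ≥ j can beat best;
-- first exact match wins (break); otherwise first substring match is recorded once
def fflB_key (best : Option (Int × Int × Int)) (s : String) (i : Int) :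
    List String → Int → Option (Int × Int × Int) → Option (Int × Int × Int)
  | [], _, key => key
  | t :: rest, j, key =>
    if fflPrune best j = true then key
    else if s = t then some (0, j, i)
    else
      match key with
      | none =>
        if (decide (t ≠ "") && PySem.Str.isIn t s) = true then
          fflB_key best s i rest (j + 1) (some (1, j, i))
        else fflB_key best s i rest (j + 1) none
      | some k => fflB_key best s i rest (j + 1) (some k)

-- outer loop over lines, keeping the lexicographically smallest key
def fflB_loop (hints : List String) : List String → Int → Option (Int × Int × Int) → Option (Int × Int × Int)
  | [], _, best => best
  | line :: rest, i, best =>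
    let key := fflB_key best (PySem.Str.strip line) i hints 0 none
    let best' :=
      match key with
      | none => best
      | some k =>
        match best with
        | none => some k
        | some b => if fflKeyLt k b then some k else some b
    fflB_loop hints rest (i + 1) best'

def find_first_matching_line_py_alt (lines : List String) (title_hints : List String) : Int :=
  match fflB_loop title_hints lines 0 none with
  | some k => k.2.2
  | none => -1

-- ===== PRECONDITION & SPEC =====
def Spec_find_first_matching_line_py (lines : List String) (title_hints : List String) (out : Int) : Prop := out = find_first_matching_line_py_alt lines title_hints
instance (lines : List String) (title_hints : List String) (out : Int) : Decidable (Spec_find_first_matching_line_py lines title_hints out) := by unfold Spec_find_first_matching_line_py; infer_instance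

-- ===== CLAIM (what is proved, stated in full; the proofs are below) =====
def Claim_equal_find_first_matching_line_py : Prop := ∀ (lines : List String) (title_hints : List String), Dom_find_first_matching_line_py lines title_hints → Spec_find_first_matching_line_py lines title_hints (find_first_matching_line_py lines title_hints)

-- ===== LEMMAS AND PROOFS =====

-- ---- basic facts about fflKeyLt (strict lexicographic order on Int triples) ----

theorem fflKeyLt_asymm {a b : Int × Int × Int} (h : fflKeyLt a b = true) : fflKeyLt b a = false := by
  obtain ⟨a1, a2, a3⟩ := a; obtain ⟨b1, b2, b3⟩ := b
  simp only [fflKeyLt, decide_eq_true_eq, decide_eq_false_iff_not] at *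
  omega

theorem fflKeyLt_antisymm {a b : Int × Int × Int} (h1 : fflKeyLt a b = false)
    (h2 : fflKeyLt b a = false) : a = b := by
  obtain ⟨a1, a2, a3⟩ := a; obtain ⟨b1, b2, b3⟩ := b
  simp only [fflKeyLt, decide_eq_false_iff_not, Prod.mk.injEq] at *
  omega

-- min of two optional keys, keeping the left argument on ties
def fflOmin (x y : Option (Int × Int × Int)) : Option (Int × Int × Int) :=
  match x, y with
  | none, y => y
  | x, none => x
  | some a, some b => if fflKeyLt b a then some b else some a

theorem fflOmin_none_left (y : Option (Int × Int × Int)) : fflOmin none y = y := by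
  cases y <;> rfl

theorem fflOmin_none_right (x : Option (Int × Int × Int)) : fflOmin x none = x := by
  cases x <;> rfl

theorem fflOmin_comm (x y : Option (Int × Int × Int)) : fflOmin x y = fflOmin y x := by
  cases x with
  | none => cases y <;> rfl
  | some a =>
    cases y with
    | none => rfl
    | some b =>
      simp only [fflOmin]
      by_cases h1 : fflKeyLt b a = true
      · simp [h1, fflKeyLt_asymm h1]
      · by_cases h2 : fflKeyLt a b = true
        · simp [h2, fflKeyLt_asymm h2]
        · simp [fflKeyLt_antisymm (eq_false_of_ne_true h1) (eq_false_of_ne_true h2)]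

theorem fflKeyLt_trans {a b c : Int × Int × Int} (h1 : fflKeyLt a b = true)
    (h2 : fflKeyLt b c = true) : fflKeyLt a c = true := by
  obtain ⟨a1, a2, a3⟩ := a; obtain ⟨b1, b2, b3⟩ := b; obtain ⟨c1, c2, c3⟩ := c
  simp only [fflKeyLt, decide_eq_true_eq] at *
  omega

theorem fflKeyLt_le_trans {a b c : Int × Int × Int} (h1 : fflKeyLt b a = false)
    (h2 : fflKeyLt c b = false) : fflKeyLt c a = false := by
  obtain ⟨a1, a2, a3⟩ := a; obtain ⟨b1, b2, b3⟩ := b; obtain ⟨c1, c2, c3⟩ := c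
  simp only [fflKeyLt, decide_eq_false_iff_not] at *
  omega

theorem fflOmin_assoc (x y z : Option (Int × Int × Int)) :
    fflOmin (fflOmin x y) z = fflOmin x (fflOmin y z) := by
  cases x with
  | none => simp [fflOmin_none_left]
  | some a =>
    cases y with
    | none => simp [fflOmin_none_left, fflOmin_none_right]
    | some b =>
      cases z with
      | none => simp [fflOmin_none_right]
      | some c =>
        simp only [fflOmin]
        by_cases hba : fflKeyLt b a = true <;> by_cases hcb : fflKeyLt c b = true
        · simp [hba, hcb, fflKeyLt_trans hcb hba]
        · simp [hba, hcb]
        · simp [hba, hcb]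
        · have hca : fflKeyLt c a = false :=
            fflKeyLt_le_trans (eq_false_of_ne_true hba) (eq_false_of_ne_true hcb)
          simp [hba, hcb, hca]

-- medial law, used to split the fold over per-line merged keys
theorem fflOmin_medial (a b x y : Option (Int × Int × Int)) :
    fflOmin (fflOmin a b) (fflOmin x y) = fflOmin (fflOmin a x) (fflOmin b y) := by
  calc fflOmin (fflOmin a b) (fflOmin x y)
      = fflOmin a (fflOmin b (fflOmin x y)) := by rw [fflOmin_assoc]
    _ = fflOmin a (fflOmin (fflOmin b x) y) := by rw [fflOmin_assoc]
    _ = fflOmin a (fflOmin (fflOmin x b) y) := by rw [fflOmin_comm b x]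
    _ = fflOmin a (fflOmin x (fflOmin b y)) := by rw [fflOmin_assoc]
    _ = fflOmin (fflOmin a x) (fflOmin b y) := by rw [fflOmin_assoc]

-- ---- generic first-index search (proof-side mirror of both programs' scans) ----

def fflFind (p : String → Bool) : List String → Int → Option Int
  | [], _ => none
  | x :: rest, i => if p x then some i else fflFind p rest (i + 1)

theorem fflFind_ge {p : String → Bool} : ∀ {xs : List String} {i v : Int},
    fflFind p xs i = some v → i ≤ v := by
  intro xs
  induction xs with
  | nil => intro i v h; simp [fflFind] at h
  | cons x rest ih =>
    intro i v h
    simp only [fflFind] at h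
    split at h
    · cases h; omega
    · have := ih h; omega

theorem fflFind_mem {p : String → Bool} : ∀ {xs : List String} {i v : Int},
    fflFind p xs i = some v → ∃ n : Nat, ∃ x, xs[n]? = some x ∧ p x = true ∧ v = i + n := by
  intro xs
  induction xs with
  | nil => intro i v h; simp [fflFind] at h
  | cons x rest ih =>
    intro i v h
    simp only [fflFind] at h
    split at h
    · cases h; exact ⟨0, x, by simp, by assumption, by simp⟩
    · obtain ⟨n, y, hy, hp, hv⟩ := ih h
      exact ⟨n + 1, y, by simpa using hy, hp, by omega⟩

theorem fflFind_min {p : String → Bool} : ∀ {xs : List String} {i v : Int},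
    fflFind p xs i = some v → ∀ (n : Nat) (x : String), xs[n]? = some x → i + n < v → p x = false := by
  intro xs
  induction xs with
  | nil => intro i v h; simp [fflFind] at h
  | cons x rest ih =>
    intro i v h n y hy hlt
    simp only [fflFind] at h
    split at h
    · cases h; omega
    · cases n with
      | zero => simp at hy; subst hy; simpa using ‹¬ p x = true›
      | succ n =>
        simp only [List.getElem?_cons_succ] at hy
        exact ih h n y hy (by omega)

theorem fflFind_none {p : String → Bool} : ∀ {xs : List String} {i : Int},
    fflFind p xs i = none → ∀ (n : Nat) (x : String), xs[n]? = some x → p x = false := by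
  intro xs
  induction xs with
  | nil => intro i _ n x hx; simp at hx
  | cons x rest ih =>
    intro i h n y hy
    simp only [fflFind] at h
    split at h
    · simp at h
    · cases n with
      | zero => simp at hy; subst hy; simpa using ‹¬ p x = true›
      | succ n => simp only [List.getElem?_cons_succ] at hy; exact ih h n y hy

theorem fflFind_of_all_false {p : String → Bool} (hp : ∀ x, p x = false) :
    ∀ (xs : List String) (i : Int), fflFind p xs i = none := by
  intro xs
  induction xs with
  | nil => intro i; rfl
  | cons x rest ih => intro i; simp [fflFind, hp x, ih]

-- ---- generic line-major fold (proof-side mirror of B's outer loop) ----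

def fflGloop (g : String → Int → Option (Int × Int × Int)) :
    List String → Int → Option (Int × Int × Int) → Option (Int × Int × Int)
  | [], _, best => best
  | l :: rest, i, best => fflGloop g rest (i + 1) (fflOmin best (g l i))

theorem fflGloop_congr {g1 g2 : String → Int → Option (Int × Int × Int)} :
    ∀ (ls : List String) (i : Int) (best : Option (Int × Int × Int)),
    (∀ (n : Nat) (l : String), ls[n]? = some l → g1 l (i + n) = g2 l (i + n)) →
    fflGloop g1 ls i best = fflGloop g2 ls i best := by
  intro ls
  induction ls with
  | nil => intro i best _; rfl
  | cons l rest ih =>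
    intro i best h
    simp only [fflGloop]
    rw [show g1 l i = g2 l i from by simpa using h 0 l (by simp)]
    exact ih (i + 1) _ (fun n x hx => by
      have := h (n + 1) x (by simpa using hx); simpa [add_assoc, add_comm, add_left_comm] using this)

theorem fflGloop_none {g : String → Int → Option (Int × Int × Int)} :
    ∀ (ls : List String) (i : Int) (best : Option (Int × Int × Int)),
    (∀ (n : Nat) (l : String), ls[n]? = some l → g l (i + n) = none) →
    fflGloop g ls i best = best := by
  intro ls
  induction ls with
  | nil => intro i best _; rfl
  | cons l rest ih =>
    intro i best h
    simp only [fflGloop]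
    rw [show g l i = none from by simpa using h 0 l (by simp), fflOmin_none_right]
    exact ih (i + 1) best (fun n x hx => by
      have := h (n + 1) x (by simpa using hx); simpa [add_assoc, add_comm, add_left_comm] using this)

-- the fold returns the unique minimum key
theorem fflGloop_min {g : String → Int → Option (Int × Int × Int)} {m : Int × Int × Int} :
    ∀ (ls : List String) (i : Int) (best : Option (Int × Int × Int)),
    (∀ a, best = some a → a = m ∨ fflKeyLt m a = true) →
    (best = some m ∨ ∃ n : Nat, ∃ l, ls[n]? = some l ∧ g l (i + n) = some m) →
    (∀ (n : Nat) (l : String) (v : Int × Int × Int), ls[n]? = some l → g l (i + n) = some v →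
      v = m ∨ fflKeyLt m v = true) →
    fflGloop g ls i best = some m := by
  intro ls
  induction ls with
  | nil =>
    intro i best _ hmem _
    rcases hmem with h | ⟨n, l, hl, _⟩
    · simpa [fflGloop] using h
    · simp at hl
  | cons l rest ih =>
    intro i best hacc hmem hmin
    simp only [fflGloop]
    apply ih (i + 1)
    · -- acc invariant for fflOmin best (g l i)
      intro a ha
      cases hb : best with
      | none =>
        cases hk : g l i with
        | none => rw [hb, hk] at ha; simp [fflOmin] at ha
        | some k =>
          rw [hb, hk] at ha; simp only [fflOmin_none_left, Option.some.injEq] at ha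
          subst ha
          exact hmin 0 l k (by simp) (by simpa using hk)
      | some b =>
        cases hk : g l i with
        | none =>
          rw [hb, hk, fflOmin_none_right] at ha
          exact hacc a (by rw [hb, ← ha])
        | some k =>
          rw [hb, hk] at ha
          simp only [fflOmin] at ha
          have hk' : k = m ∨ fflKeyLt m k = true := hmin 0 l k (by simp) (by simpa using hk)
          have hb' : b = m ∨ fflKeyLt m b = true := hacc b hb
          split at ha <;> (cases ha; first | exact hk' | exact hb')
    · -- membership
      rcases hmem with h | ⟨n, x, hx, hg⟩
      · -- best = some m
        left
        rw [h]
        cases hk : g l i with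
        | none => rfl
        | some k =>
          have hk' : k = m ∨ fflKeyLt m k = true := hmin 0 l k (by simp) (by simpa using hk)
          simp only [fflOmin]
          rcases hk' with rfl | hlt
          · split <;> rfl
          · rw [if_neg (by simp [fflKeyLt_asymm hlt])]
      · cases n with
        | zero =>
          left
          simp at hx; subst hx
          simp only [Nat.cast_zero, add_zero] at hg
          rw [hg]
          cases hb : best with
          | none => simp [fflOmin]
          | some b =>
            have hb' : b = m ∨ fflKeyLt m b = true := hacc b hb
            simp only [fflOmin]
            rcases hb' with rfl | hlt
            · split <;> rfl
            · rw [if_pos hlt]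
        | succ n =>
          right
          refine ⟨n, x, by simpa using hx, ?_⟩
          have : i + 1 + (n : Int) = i + ((n : Nat) + 1 : Nat) := by push_cast; ring
          rw [this]; exact hg
    · intro n x v hx hg
      refine hmin (n + 1) x v (by simpa using hx) ?_
      rw [show (i + (((n : Nat) + 1 : Nat) : Int)) = i + 1 + (n : Int) from by push_cast; ring]
      exact hg

-- ---- hint-major triple form (proof-side mirror of A's staged passes) ----

def fflAtriple (q : String → String → Bool) (ph : Int) (lines : List String) (ioff : Int) :
    List String → Int → Option (Int × Int × Int)
  | [], _ => none
  | t :: rest, joff =>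
    match fflFind (fun l => q l t) lines ioff with
    | some i => some (ph, joff, i)
    | none => fflAtriple q ph lines ioff rest (joff + 1)

theorem fflAtriple_phase {q : String → String → Bool} {ph : Int} {lines : List String} {ioff : Int} :
    ∀ {hints : List String} {joff : Int} {k : Int × Int × Int},
    fflAtriple q ph lines ioff hints joff = some k → k.1 = ph := by
  intro hints
  induction hints with
  | nil => intro joff k h; simp [fflAtriple] at h
  | cons t rest ih =>
    intro joff k h
    simp only [fflAtriple] at h
    split at h
    · cases h; rfl
    · exact ih h

-- THE TRANSPOSE LEMMA: the line-major minimum of per-line first-hint keys equals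
-- the hint-major staged search.
theorem ffl_transpose (q : String → String → Bool) (ph : Int) :
    ∀ (hints : List String) (joff : Int) (lines : List String) (ioff : Int),
    fflGloop (fun l i => (fflFind (fun t => q l t) hints joff).map (fun j => (ph, j, i)))
      lines ioff none
    = fflAtriple q ph lines ioff hints joff := by
  intro hints
  induction hints with
  | nil =>
    intro joff lines ioff
    rw [fflGloop_none]
    · simp [fflAtriple]
    · intro n l _; simp [fflFind]
  | cons t rest ih =>
    intro joff lines ioff
    simp only [fflAtriple]
    cases hf : fflFind (fun l => q l t) lines ioff with
    | some i0 =>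
      -- some line matches hint t exactly at this phase; the min key is (ph, joff, i0)
      apply fflGloop_min lines ioff none (by simp)
      · right
        obtain ⟨n, l, hl, hp, hv⟩ := fflFind_mem hf
        exact ⟨n, l, hl, by rw [← hv]; simp [fflFind, hp]⟩
      · intro n l v hl hg
        simp only [Option.map_eq_some_iff] at hg
        obtain ⟨j, hj, hv⟩ := hg
        simp only [fflFind] at hj
        by_cases hq : q l t = true
        · rw [if_pos hq] at hj
          cases hj
          have hge : ¬ (ioff + (n : Int) < i0) := by
            intro hlt
            have h2 := fflFind_min hf n l hl hlt
            simp only [hq] at h2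
            exact Bool.noConfusion h2
          subst hv
          by_cases he : ioff + (n : Int) = i0
          · left; rw [he]
          · right; simp [fflKeyLt]; omega
        · rw [if_neg hq] at hj
          have hge := fflFind_ge hj
          subst hv
          right; simp [fflKeyLt]; omega
    | none =>
      -- no line matches hint t at this phase: every per-line key comes from the rest
      rw [fflGloop_congr lines ioff none (g2 := fun l i =>
        (fflFind (fun t => q l t) rest (joff + 1)).map (fun j => (ph, j, i)))]
      · exact ih (joff + 1) lines ioff
      · intro n l hl
        have hq : q l t = false := fflFind_none hf n l hl
        simp [fflFind, hq]

-- ---- bridging A's ports to the fflFind / fflAtriple forms ----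

theorem fflA_lineIndex_eq (t : String) : ∀ (ls : List String) (i : Int),
    fflA_lineIndex t ls i = (fflFind (fun l => PySem.Str.strip l == t) ls i).getD (-1) := by
  intro ls
  induction ls with
  | nil => intro i; simp [fflA_lineIndex, fflFind]
  | cons l rest ih =>
    intro i
    simp only [fflA_lineIndex, fflFind, beq_iff_eq]
    split <;> simp_all

theorem fflA_subScan_eq (t : String) : ∀ (ls : List String) (i : Int),
    fflA_subScan t ls i = fflFind (fun l => PySem.Str.isIn t (PySem.Str.strip l)) ls i := by
  intro ls
  induction ls with
  | nil => intro i; rfl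
  | cons l rest ih =>
    intro i
    simp only [fflA_subScan, fflFind]
    split <;> simp_all

-- predicate q for the exact phase and for the substring phase
def fflQE (l t : String) : Bool := PySem.Str.strip l == t
def fflQS (l t : String) : Bool := decide (t ≠ "") && PySem.Str.isIn t (PySem.Str.strip l)

theorem fflA_phase1_eq (lines : List String) : ∀ (hints : List String) (joff : Int),
    fflA_phase1 lines hints = (fflAtriple fflQE 0 lines 0 hints joff).map (fun k => k.2.2) := by
  intro hints
  induction hints with
  | nil => intro joff; rfl
  | cons t rest ih =>
    intro joff
    simp only [fflA_phase1, fflAtriple, fflA_lineIndex_eq]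
    cases hf : fflFind (fun l => fflQE l t) lines 0 with
    | some i =>
      have : (0 : Int) ≤ i := fflFind_ge hf
      simp only [fflQE] at hf
      rw [hf]
      simp [this]
    | none =>
      simp only [fflQE] at hf
      rw [hf]
      simpa using ih (joff + 1)

theorem fflA_phase2_eq (lines : List String) : ∀ (hints : List String) (joff : Int),
    fflA_phase2 lines hints =
      match fflAtriple fflQS 1 lines 0 hints joff with
      | some k => k.2.2
      | none => -1 := by
  intro hints
  induction hints with
  | nil => intro joff; rfl
  | cons t rest ih =>
    intro joff
    simp only [fflA_phase2, fflAtriple]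
    by_cases ht : t = ""
    · subst ht
      rw [fflFind_of_all_false (p := fun l => fflQS l "") (by intro x; simp [fflQS])]
      simpa using ih (joff + 1)
    · have hq : (fun l => fflQS l t) = fun l => PySem.Str.isIn t (PySem.Str.strip l) := by
        funext l; simp [fflQS, ht]
      rw [if_neg ht, fflA_subScan_eq, ← hq]
      cases hf : fflFind (fun l => fflQS l t) lines 0 with
      | some i => simp
      | none => simpa using ih (joff + 1)

-- ---- bridging B's ports ----

-- proof-side unpruned inner loop (what fflB_key computes when the prune never fires)
def fflU_key (s : String) (i : Int) :
    List String → Int → Option (Int × Int × Int) → Option (Int × Int × Int)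
  | [], _, key => key
  | t :: rest, j, key =>
    if s = t then some (0, j, i)
    else
      match key with
      | none =>
        if (decide (t ≠ "") && PySem.Str.isIn t s) = true then
          fflU_key s i rest (j + 1) (some (1, j, i))
        else fflU_key s i rest (j + 1) none
      | some k => fflU_key s i rest (j + 1) (some k)

-- once a substring key is recorded, only a later exact match can replace it
theorem fflU_key_some (s : String) (i : Int) : ∀ (hints : List String) (j : Int) (k : Int × Int × Int),
    fflU_key s i hints j (some k) =
      match fflFind (fun t => s == t) hints j with
      | some je => some (0, je, i)
      | none => some k := by
  intro hints
  induction hints with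
  | nil => intro j k; rfl
  | cons t rest ih =>
    intro j k
    simp only [fflU_key, fflFind, beq_iff_eq]
    split <;> simp_all

theorem fflU_key_none (s : String) (i : Int) : ∀ (hints : List String) (j : Int),
    fflU_key s i hints j none =
      match fflFind (fun t => s == t) hints j with
      | some je => some (0, je, i)
      | none =>
        (fflFind (fun t => decide (t ≠ "") && PySem.Str.isIn t s) hints j).map
          (fun js => (1, js, i)) := by
  intro hints
  induction hints with
  | nil => intro j; rfl
  | cons t rest ih =>
    intro j
    simp only [fflU_key, fflFind, beq_iff_eq]
    by_cases hst : s = t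
    · simp [hst]
    · rw [if_neg hst, if_neg hst]
      by_cases hsub : (decide (t ≠ "") && PySem.Str.isIn t s) = true
      · rw [if_pos hsub, if_pos hsub, fflU_key_some]
        cases fflFind (fun t => s == t) rest (j + 1) <;> rfl
      · rw [if_neg hsub, if_neg (by simpa using hsub), ih]

-- the per-line key is the fflOmin of the exact-phase key and the substring-phase key
theorem fflU_key_split (s : String) (i : Int) (hints : List String) :
    fflU_key s i hints 0 none =
      fflOmin ((fflFind (fun t => s == t) hints 0).map (fun j => ((0 : Int), j, i)))
        ((fflFind (fun t => decide (t ≠ "") && PySem.Str.isIn t s) hints 0).map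
          (fun j => ((1 : Int), j, i))) := by
  rw [fflU_key_none]
  cases he : fflFind (fun t => s == t) hints 0 with
  | some je =>
    cases hs : fflFind (fun t => decide (t ≠ "") && PySem.Str.isIn t s) hints 0 with
    | some js => simp [fflOmin, fflKeyLt]
    | none => simp [fflOmin]
  | none => simp [fflOmin_none_left]

-- every key the unpruned inner loop produces is for the current line (third component i)
theorem fflU_key_third (s : String) (i : Int) : ∀ (hints : List String) (j : Int)
    (key : Option (Int × Int × Int)) (k : Int × Int × Int),
    (∀ k0, key = some k0 → k0.2.2 = i) →
    fflU_key s i hints j key = some k → k.2.2 = i := by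
  intro hints
  induction hints with
  | nil => intro j key k hkey h; exact hkey k h
  | cons t rest ih =>
    intro j key k hkey h
    cases key with
    | none =>
      simp only [fflU_key] at h
      by_cases hst : s = t
      · rw [if_pos hst] at h; cases h; rfl
      · rw [if_neg hst] at h
        split at h
        · exact ih (j + 1) _ k (by intro k0 h0; cases h0; rfl) h
        · exact ih (j + 1) _ k (by intro k0 h0; cases h0) h
    | some k0 =>
      have hk0 : k0.2.2 = i := hkey k0 rfl
      simp only [fflU_key] at h
      by_cases hst : s = t
      · rw [if_pos hst] at h; cases h; rfl
      · rw [if_neg hst] at h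
        exact ih (j + 1) _ k (by intro x hx; cases hx; exact hk0) h

-- B's running-minimum update is fflOmin
theorem fflMerge_eq (best key : Option (Int × Int × Int)) :
    (match key with
      | none => best
      | some k =>
        match best with
        | none => some k
        | some b => if fflKeyLt k b then some k else some b) = fflOmin best key := by
  cases key with
  | none => simp [fflOmin_none_right]
  | some k => cases best <;> simp [fflOmin]

-- with the prune bound sound, the pruned inner loop yields the same running minimum
theorem fflB_key_omin (best : Option (Int × Int × Int)) (s : String) (i : Int)
    (hb : ∀ b, best = some b → b.2.2 < i) :
    ∀ (hints : List String) (j : Int) (key : Option (Int × Int × Int)),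
    (∀ k0, key = some k0 → k0.1 = 1) →
    fflOmin best (fflB_key best s i hints j key) = fflOmin best (fflU_key s i hints j key) := by
  intro hints
  induction hints with
  | nil => intro j key _; rfl
  | cons t rest ih =>
    intro j key hkey
    by_cases hp : fflPrune best j = true
    · -- the prune fires: best = some b with b.1 < 0, or b.1 = 0 and b.2.1 ≤ j;
      -- no key the unpruned loop can still produce beats b, so both sides are some b
      rw [show fflB_key best s i (t :: rest) j key = key from by simp only [fflB_key]; rw [if_pos hp]]
      cases hbst : best with
      | none => rw [hbst] at hp; simp [fflPrune] at hp
      | some b =>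
        rw [hbst] at hp
        simp only [fflPrune, decide_eq_true_eq] at hp
        have hb3 : b.2.2 < i := hb b hbst
        have hlose : ∀ v : Int × Int × Int,
            (v.1 = 1 ∨ (v.1 = 0 ∧ j ≤ v.2.1 ∧ v.2.2 = i)) → fflKeyLt v b = false := by
          intro v hv
          obtain ⟨v1, v2, v3⟩ := v; obtain ⟨b1, b2, b3⟩ := b
          simp only [fflKeyLt, decide_eq_false_iff_not]
          simp only at hv hp hb3
          omega
        have homin : ∀ w : Int × Int × Int, fflKeyLt w b = false →
            fflOmin (some b) (some w) = some b := by
          intro w hw; simp [fflOmin, hw]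
        have hkey_side : fflOmin (some b) key = some b := by
          cases hk : key with
          | none => rfl
          | some k0 => exact homin k0 (hlose k0 (Or.inl (hkey k0 hk)))
        rw [hkey_side]
        cases hk : key with
        | some k0 =>
          rw [fflU_key_some]
          cases hf : fflFind (fun t => s == t) (t :: rest) j with
          | some je =>
            have hge : j ≤ je := fflFind_ge hf
            exact (homin _ (hlose (0, je, i) (Or.inr ⟨rfl, hge, rfl⟩))).symm
          | none => exact (homin k0 (hlose k0 (Or.inl (hkey k0 hk)))).symm
        | none =>
          rw [fflU_key_none]
          cases hf : fflFind (fun t => s == t) (t :: rest) j with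
          | some je =>
            have hge : j ≤ je := fflFind_ge hf
            exact (homin _ (hlose (0, je, i) (Or.inr ⟨rfl, hge, rfl⟩))).symm
          | none =>
            cases hs : fflFind (fun t => decide (t ≠ "") && PySem.Str.isIn t s) (t :: rest) j with
            | some js => exact (homin _ (hlose (1, js, i) (Or.inl rfl))).symm
            | none => rfl
    · simp only [fflB_key, fflU_key, if_neg hp]
      by_cases hst : s = t
      · rw [if_pos hst, if_pos hst]
      · rw [if_neg hst, if_neg hst]
        cases hk : key with
        | none =>
          by_cases hsub : (decide (t ≠ "") && PySem.Str.isIn t s) = true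
          · rw [if_pos hsub, if_pos hsub]
            exact ih (j + 1) _ (by intro k0 h0; cases h0; rfl)
          · rw [if_neg hsub, if_neg hsub]
            exact ih (j + 1) _ (by intro k0 h0; cases h0)
        | some k0 =>
          exact ih (j + 1) _ (by intro x hx; cases hx; exact hkey k0 hk)

-- B's loop is the generic fold of per-line (unpruned) keys
theorem fflB_loop_eq_gloop (hints : List String) : ∀ (ls : List String) (i : Int)
    (best : Option (Int × Int × Int)),
    (∀ b, best = some b → b.2.2 < i) →
    fflB_loop hints ls i best =
      fflGloop (fun l i => fflU_key (PySem.Str.strip l) i hints 0 none) ls i best := by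
  intro ls
  induction ls with
  | nil => intro i best _; rfl
  | cons l rest ih =>
    intro i best hb
    simp only [fflB_loop, fflGloop]
    rw [fflMerge_eq, fflB_key_omin best _ i hb hints 0 none (by intro k0 h0; cases h0)]
    apply ih
    intro b hbm
    rw [fflOmin_comm] at hbm
    cases hk : fflU_key (PySem.Str.strip l) i hints 0 none with
    | none =>
      rw [hk, fflOmin_none_left] at hbm
      have := hb b hbm; omega
    | some k =>
      rw [hk] at hbm
      have hki : k.2.2 = i := fflU_key_third _ i hints 0 none k (by intro k0 h0; cases h0) hk
      cases hbst : best with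
      | none => rw [hbst, fflOmin_none_right] at hbm; cases hbm; omega
      | some b0 =>
        rw [hbst] at hbm
        have hb0 := hb b0 hbst
        simp only [fflOmin] at hbm
        split at hbm <;> (cases hbm; omega)

-- splitting the fold over merged keys into the two phase folds
theorem fflGloop_split (g1 g2 : String → Int → Option (Int × Int × Int)) :
    ∀ (ls : List String) (i : Int) (a b : Option (Int × Int × Int)),
    fflGloop (fun l i => fflOmin (g1 l i) (g2 l i)) ls i (fflOmin a b) =
      fflOmin (fflGloop g1 ls i a) (fflGloop g2 ls i b) := by
  intro ls
  induction ls with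
  | nil => intro i a b; rfl
  | cons l rest ih =>
    intro i a b
    simp only [fflGloop]
    rw [fflOmin_medial, ih]

-- ===== VERDICT (by name: the statement is the Claim_ definition above) =====
theorem find_first_matching_line_py_spec : Claim_equal_find_first_matching_line_py := by
  intro lines hints _
  unfold Spec_find_first_matching_line_py find_first_matching_line_py find_first_matching_line_py_alt
  rw [fflB_loop_eq_gloop hints lines 0 none (by intro b h; cases h),
    fflGloop_congr lines 0 none (g2 := fun l i =>
      fflOmin ((fflFind (fun t => fflQE l t) hints 0).map (fun j => ((0 : Int), j, i)))
        ((fflFind (fun t => fflQS l t) hints 0).map (fun j => ((1 : Int), j, i))))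
      (by intro n l _; rw [fflU_key_split]; rfl),
    show (none : Option (Int × Int × Int)) = fflOmin none none from rfl,
    fflGloop_split, ffl_transpose, ffl_transpose,
    fflA_phase1_eq lines hints 0, fflA_phase2_eq lines hints 0]
  cases hE : fflAtriple fflQE 0 lines 0 hints 0 with
  | none => simp [fflOmin_none_left]
  | some k =>
    have hk : k.1 = 0 := fflAtriple_phase hE
    cases hS : fflAtriple fflQS 1 lines 0 hints 0 with
    | none => simp [fflOmin_none_right]
    | some k' =>
      have hk' : k'.1 = 1 := fflAtriple_phase hS
      have : fflKeyLt k' k = false := by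
        simp only [fflKeyLt, decide_eq_false_iff_not]
        omega
      simp [fflOmin, this]
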